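-- pv_equiv track=rewrite | github.com/binzhango/omni_api | python/omni_api/planner.py | _best_candidates
-- ===== SOURCE A (Python) =====
-- def _normalize(value: str) -> str:
--     return value.replace("_", "").lower()
--
-- def _best_candidates(target_key: str, source_paths: list[str]) -> tuple[list[str], list[str]]:
--     exact = [path for path in source_paths if path == target_key]
--     if exact:
--         return exact, []
--
--     target_norm = _normalize(target_key)
--     normalized_direct = [
--         path for path in source_paths if "." not in path and _normalize(path) == target_norm
--     ]
--     if normalized_direct:
--         return normalized_direct, []
--
--     nested_leaf = [
--         path
--         for path in source_paths
--         if "." in path and _normalize(path.rsplit(".", 1)[1]) == target_norm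
--     ]
--     if nested_leaf:
--         return nested_leaf, nested_leaf
--
--     return [], []
-- ===== SOURCE B (Python) =====
-- def _normalize(value: str) -> str:
--     return value.replace("_", "").lower()
--
-- def _best_candidates(target_key: str, source_paths: list[str]) -> tuple[list[str], list[str]]:
--     target_norm = _normalize(target_key)
--     exact, direct, nested = [], [], []
--     for path in source_paths:
--         if path == target_key:
--             exact.append(path)
--         if "." in path:
--             if _normalize(path.rsplit(".", 1)[1]) == target_norm:
--                 nested.append(path)
--         elif _normalize(path) == target_norm:
--             direct.append(path)
--     if exact:
--         return exact, []
--     if direct: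
--         return direct, []
--     if nested:
--         return nested, nested
--     return [], []
-- ===== Notes on version B (the rewrite author's own statement) =====
-- stated objective: alternative
-- what changed: Replaces A's three separate priority-ordered list comprehensions (three passes over source_paths) with one single loop that classifies each path into exact/direct/nested buckets, normalizing the target once, then returns by priority.
import Mathlib
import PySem

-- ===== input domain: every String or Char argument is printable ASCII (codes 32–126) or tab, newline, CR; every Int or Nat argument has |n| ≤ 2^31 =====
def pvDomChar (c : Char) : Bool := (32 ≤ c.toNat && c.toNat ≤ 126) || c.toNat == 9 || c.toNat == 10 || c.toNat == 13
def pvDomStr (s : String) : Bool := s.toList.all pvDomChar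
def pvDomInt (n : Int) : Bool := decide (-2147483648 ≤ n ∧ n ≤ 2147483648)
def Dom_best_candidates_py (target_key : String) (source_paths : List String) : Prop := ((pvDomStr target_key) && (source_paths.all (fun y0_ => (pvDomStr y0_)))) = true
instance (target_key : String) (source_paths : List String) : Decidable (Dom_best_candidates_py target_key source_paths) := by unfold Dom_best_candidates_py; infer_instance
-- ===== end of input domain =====

-- B replaces A's three separate priority-ordered comprehensions (up to three passes) with one
-- single classifying loop over source_paths (objective: alternative decomposition, same cost).

-- ===== PORT A =====
-- _normalize: value.replace("_", "").lower()
def pvNorm (value : String) : String := PySem.Str.lower (PySem.Str.replace value "_" "")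

-- port of path.rsplit(".", 1)[1]; exact whenever "." occurs in path (guarded at every call site):
-- the characters after the LAST '.' of the string.
def pvRsplitLeaf (path : String) : String :=
  String.ofList (path.toList.foldl (fun acc c => if c = '.' then [] else acc ++ [c]) [])

def best_candidates_py (target_key : String) (source_paths : List String) : List String × List String :=
  let exact := source_paths.filter (fun path => path == target_key)
  if exact ≠ [] then (exact, []) else
  let target_norm := pvNorm target_key
  let normalized_direct := source_paths.filter
    (fun path => !PySem.Str.isIn "." path && pvNorm path == target_norm)
  if normalized_direct ≠ [] then (normalized_direct, []) else
  let nested_leaf := source_paths.filter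
    (fun path => PySem.Str.isIn "." path && pvNorm (pvRsplitLeaf path) == target_norm)
  if nested_leaf ≠ [] then (nested_leaf, nested_leaf) else ([], [])

-- ===== PORT B =====
-- loop body of B's single classifying pass (state: exact, direct, nested buckets)
def pvStep (target_key target_norm : String) (st : List String × List String × List String)
    (path : String) : List String × List String × List String :=
  let st := if path == target_key then (st.1 ++ [path], st.2.1, st.2.2) else st
  if PySem.Str.isIn "." path then
    if pvNorm (pvRsplitLeaf path) == target_norm then (st.1, st.2.1, st.2.2 ++ [path]) else st
  else
    if pvNorm path == target_norm then (st.1, st.2.1 ++ [path], st.2.2) else st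

def best_candidates_py_alt (target_key : String) (source_paths : List String) : List String × List String :=
  let target_norm := pvNorm target_key
  let acc := source_paths.foldl (pvStep target_key target_norm) ([], [], [])
  if acc.1 ≠ [] then (acc.1, []) else
  if acc.2.1 ≠ [] then (acc.2.1, []) else
  if acc.2.2 ≠ [] then (acc.2.2, acc.2.2) else ([], [])

-- ===== PRECONDITION & SPEC =====
def Spec_best_candidates_py (target_key : String) (source_paths : List String) (out : List String × List String) : Prop := out = best_candidates_py_alt target_key source_paths
instance (target_key : String) (source_paths : List String) (out : List String × List String) : Decidable (Spec_best_candidates_py target_key source_paths out) := by unfold Spec_best_candidates_py; infer_instance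

-- ===== CLAIM (what is proved, stated in full; the proofs are below) =====
def Claim_equal_best_candidates_py : Prop := ∀ (target_key : String) (source_paths : List String), Dom_best_candidates_py target_key source_paths → Spec_best_candidates_py target_key source_paths (best_candidates_py target_key source_paths)

-- ===== LEMMAS AND PROOFS =====

theorem pvStep_eq (tk tn : String) (e d n : List String) (x : String) :
    pvStep tk tn (e, d, n) x =
      (e ++ (if x == tk then [x] else []),
       d ++ (if !PySem.Str.isIn "." x && pvNorm x == tn then [x] else []),
       n ++ (if PySem.Str.isIn "." x && pvNorm (pvRsplitLeaf x) == tn then [x] else [])) := by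
  unfold pvStep
  by_cases hx : x == tk <;> by_cases hd : PySem.Str.isIn "." x <;>
    by_cases hn : pvNorm (pvRsplitLeaf x) == tn <;>
    by_cases hp : pvNorm x == tn <;>
    simp_all

-- B's single classifying fold produces exactly A's three filters.
theorem pv_fold_eq_filters (tk tn : String) (sp : List String) (e d n : List String) :
    sp.foldl (pvStep tk tn) (e, d, n)
    = (e ++ sp.filter (fun path => path == tk),
       d ++ sp.filter (fun path => !PySem.Str.isIn "." path && pvNorm path == tn),
       n ++ sp.filter (fun path => PySem.Str.isIn "." path && pvNorm (pvRsplitLeaf path) == tn)) := by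
  induction sp generalizing e d n with
  | nil => simp
  | cons x xs ih =>
    rw [List.foldl_cons, pvStep_eq, ih]
    by_cases hx : x == tk <;> by_cases hd : PySem.Str.isIn "." x <;>
      by_cases hn : pvNorm (pvRsplitLeaf x) == tn <;>
      by_cases hp : pvNorm x == tn <;>
      simp_all

theorem best_candidates_py_eq (tk : String) (sp : List String) :
    best_candidates_py tk sp = best_candidates_py_alt tk sp := by
  unfold best_candidates_py best_candidates_py_alt
  simp only [pv_fold_eq_filters, List.nil_append]

-- ===== VERDICT (by name: the statement is the Claim_ definition above) =====
theorem best_candidates_py_spec : Claim_equal_best_candidates_py := by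
  intro tk sp _
  unfold Spec_best_candidates_py
  exact best_candidates_py_eq tk sp
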